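-- pv_equiv track=rewrite | github.com/thatbeer/real-time-implementation-of-inertia-foot-mounted-navigation-system | mimu/MIMU4492-4X9C/utilities.py | get_plot_options
-- ===== SOURCE A (Python) =====
-- def get_plot_options(select_acm, binary_string):
--     """
--      Get Plot options
--      :param select_acm:
--      :param binary_string:
--      :return list of number e.g. [1, 2 , 3 ] mean Plot must
--             contains Acc(1), Gyro (2) and Magn(3):
--     """
--     plot_opt = set()
--     for indx in range(0, len(binary_string)):
--         if binary_string[indx] == '1':
--             acc_gyro = select_acm[indx]
--             for j in range(0, len(acc_gyro)):
--                 if acc_gyro[j] == '1':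
--                     if j < 3:
--                         plot_opt.add(1)
--                     elif j < 6:
--                         plot_opt.add(2)
--                     else:
--                         plot_opt.add(3)
--     return list(plot_opt)
-- ===== SOURCE B (Python) =====
-- def get_plot_options(select_acm, binary_string):
--     active = [seg for bit, seg in zip(binary_string, select_acm) if bit == '1']
--     options = []
--     for code, lo, hi in ((1, 0, 3), (2, 3, 6), (3, 6, None)):
--         if any('1' in seg[lo:hi] for seg in active):
--             options.append(code)
--     return options
-- ===== Notes on version B (the rewrite author's own statement) =====
-- stated objective: alternative
-- what changed: Loops are transposed and the set removed: B first collects the active sensor strings via zip-filter, then iterates over the three category ranges, appending each code whose range contains a '1' in any active string, building the sorted output directly instead of A's per-sensor per-character classification into a set.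
import Mathlib
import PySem

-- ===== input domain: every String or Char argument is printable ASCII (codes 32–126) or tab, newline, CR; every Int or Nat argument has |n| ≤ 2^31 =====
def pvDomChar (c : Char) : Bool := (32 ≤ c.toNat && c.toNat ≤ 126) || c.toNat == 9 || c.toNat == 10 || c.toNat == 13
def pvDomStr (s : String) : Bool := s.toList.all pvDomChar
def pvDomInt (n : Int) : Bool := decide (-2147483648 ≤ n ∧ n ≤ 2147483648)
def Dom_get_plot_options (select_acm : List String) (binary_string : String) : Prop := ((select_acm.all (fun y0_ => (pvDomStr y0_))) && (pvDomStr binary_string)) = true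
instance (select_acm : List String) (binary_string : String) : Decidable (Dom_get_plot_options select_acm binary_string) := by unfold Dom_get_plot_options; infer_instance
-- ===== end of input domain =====

-- B transposes A's loops: it collects the active sensor strings once (zip + filter), then loops
-- over the three category ranges and appends each code whose range holds a '1' in some active
-- string, building the output directly in ascending order with no set; objective: alternative.

-- ===== PORT A =====
-- 'for indx in range(0, len(binary_string)): … binary_string[indx]' ported as a fold over the
-- enumerated character list (index always in range, so this is exact); likewise the inner loop.
-- list(plot_opt): the set is ⊆ {1,2,3}; CPython lists such small nonnegative ints in ascending
-- value order (identity hashing, table size 8), so list(plot_opt) is ported as sorting — exact here.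
def get_plot_options (select_acm : List String) (binary_string : String) : List Int :=
  PySem.List.sorted
    ((PySem.List.enumerate binary_string.toList 0).foldl (fun s p =>
      if p.2 = '1' then
        match PySem.List.pyGet? select_acm p.1 with
        | none => s  -- IndexError in Python; excluded by Pre_get_plot_options
        | some acc_gyro =>
            (PySem.List.enumerate acc_gyro.toList 0).foldl (fun s q =>
              if q.2 = '1' then
                if q.1 < 3 then PySem.Set.add s 1 else if q.1 < 6 then PySem.Set.add s 2 else PySem.Set.add s 3
              else s) s
      else s) (PySem.Set.empty : PySem.Set Int))
    (fun x => x) false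

-- ===== PORT B =====
def get_plot_options_alt (select_acm : List String) (binary_string : String) : List Int :=
  let active := ((binary_string.toList.zip select_acm).filter (fun p => p.1 = '1')).map (fun p => p.2)
  ([((1 : Int), ((0 : Int), some (3 : Int))), (2, (3, some 6)), (3, (6, none))].filter
      (fun r => active.any (fun seg => PySem.Str.isIn "1" (PySem.Str.slice seg (some r.2.1) r.2.2)))).foldl
    (fun options r => options ++ [r.1]) []

-- ===== PRECONDITION & SPEC =====
-- Pre_ excludes exactly the inputs where the Python A raises IndexError: a '1' in binary_string at
-- an index ≥ len(select_acm).
def Pre_get_plot_options (select_acm : List String) (binary_string : String) : Prop :=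
  '1' ∉ binary_string.toList.drop select_acm.length
instance (select_acm : List String) (binary_string : String) : Decidable (Pre_get_plot_options select_acm binary_string) := by unfold Pre_get_plot_options; infer_instance
def pvWitness_get_plot_options : List String × String := (["100010001", "000000000"], "10")
def Spec_get_plot_options (select_acm : List String) (binary_string : String) (out : List Int) : Prop := out = get_plot_options_alt select_acm binary_string
instance (select_acm : List String) (binary_string : String) (out : List Int) : Decidable (Spec_get_plot_options select_acm binary_string out) := by unfold Spec_get_plot_options; infer_instance

-- ===== CLAIM (what is proved, stated in full; the proofs are below) =====
def Claim_equal_get_plot_options : Prop := ∀ (select_acm : List String) (binary_string : String), Dom_get_plot_options select_acm binary_string → Pre_get_plot_options select_acm binary_string → Spec_get_plot_options select_acm binary_string (get_plot_options select_acm binary_string)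

-- ===== LEMMAS AND PROOFS =====

-- B's zip-fold body in set form (proof artifact: A's loop is first rewritten to this shape)
def pvInner (seg : String) (s : PySem.Set Int) : PySem.Set Int :=
  let s1 := if PySem.Str.isIn "1" (PySem.Str.slice seg (some 0) (some 3)) then PySem.Set.add s 1 else s
  let s2 := if PySem.Str.isIn "1" (PySem.Str.slice seg (some 3) (some 6)) then PySem.Set.add s1 2 else s1
  if PySem.Str.isIn "1" (PySem.Str.slice seg (some 6) none) then PySem.Set.add s2 3 else s2

def pvZ (s : PySem.Set Int) (p : Char × String) : PySem.Set Int :=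
  if p.1 = '1' then pvInner p.2 s else s

-- the inner-A fold over a character segment whose indices all map to the same category c
theorem pv_fold_const (l : List Char) (a : Int) (c : Int) (s : PySem.Set Int)
    (h : ∀ j : Int, a ≤ j → j < a + l.length →
      (if j < 3 then (1:Int) else if j < 6 then 2 else 3) = c) :
    (PySem.List.enumerate l a).foldl (fun s q =>
        if q.2 = '1' then
          if q.1 < 3 then s.add 1 else if q.1 < 6 then s.add 2 else s.add 3
        else s) s
      = if '1' ∈ l then s.add c else s := by
  induction l generalizing a s with
  | nil => simp [PySem.List.enumerate_nil]
  | cons x xs ih =>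
      rw [PySem.List.enumerate_cons, List.foldl_cons]
      have hx : (if x = '1' then
          (if a < 3 then s.add 1 else if a < 6 then s.add 2 else s.add 3) else s)
          = if x = '1' then s.add c else s := by
        have hpos : (0:Int) < ((x :: xs).length : Int) := by exact_mod_cast Nat.succ_pos xs.length
        have := h a (le_refl a) (by omega)
        split_ifs at this ⊢ <;> simp_all
      rw [show (if x = '1' then
          (if a < 3 then s.add 1 else if a < 6 then s.add 2 else s.add 3) else s)
          = if x = '1' then s.add c else s from hx]
      rw [ih (a+1) _ (by intro j h1 h2; exact h j (by omega) (by simp at h2 ⊢; omega))]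
      by_cases hx1 : x = '1' <;> by_cases hm : '1' ∈ xs <;>
        simp only [hx1, hm, List.mem_cons, eq_comm, or_false, if_pos]
        <;> simp_all

theorem pv_singleton_infix {α : Type} (a : α) (l : List α) : [a] <:+: l ↔ a ∈ l := by
  constructor
  · intro h; exact (List.singleton_sublist).1 h.sublist
  · intro h
    obtain ⟨u, v, huv⟩ := List.append_of_mem h
    exact ⟨u, v, by simp [huv]⟩

theorem pv_isIn_one (t : String) : PySem.Str.isIn "1" t = ('1' ∈ t.toList : Bool) := by
  by_cases h : '1' ∈ t.toList
  · simp only [h, decide_true]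
    simp only [PySem.Str.isIn_eq, PySem.Chars.isIn_iff_infix]
    exact (pv_singleton_infix '1' t.toList).2 h
  · simp only [h, decide_false]
    simp only [PySem.Str.isIn_eq, PySem.Chars.isIn_eq_false_iff]
    intro hc
    exact h ((pv_singleton_infix '1' t.toList).1 hc)

-- per active sensor string, A's inner loop equals B's three slice tests
set_option maxHeartbeats 1000000 in
theorem pv_inner_eq (seg : String) (s : PySem.Set Int) :
    (PySem.List.enumerate seg.toList 0).foldl (fun s q =>
        if q.2 = '1' then
          if q.1 < 3 then s.add 1 else if q.1 < 6 then s.add 2 else s.add 3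
        else s) s
    = pvInner seg s := by
  unfold pvInner
  have h1 : (PySem.Str.slice seg (some 0) (some 3)).toList = seg.toList.take 3 := by simp [pysem]
  have h2 : (PySem.Str.slice seg (some 3) (some 6)).toList = (seg.toList.drop 3).take 3 := by
    simp [pysem]
  have h3 : (PySem.Str.slice seg (some 6) none).toList = seg.toList.drop 6 := by simp [pysem]
  simp only [pv_isIn_one, h1, h2, h3, decide_eq_true_eq]
  have hsplit : seg.toList
      = seg.toList.take 3 ++ ((seg.toList.drop 3).take 3 ++ seg.toList.drop 6) := by
    conv_lhs => rw [← List.take_append_drop 3 seg.toList]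
    congr 1
    conv_lhs => rw [← List.take_append_drop 3 (seg.toList.drop 3)]
    rw [List.drop_drop]
  conv_lhs => rw [hsplit]
  rw [PySem.List.enumerate_append, PySem.List.enumerate_append,
    List.foldl_append, List.foldl_append]
  have e1 : (seg.toList.take 3).length = min 3 seg.toList.length := by simp
  have e2 : ((seg.toList.drop 3).take 3).length = min 3 (seg.toList.length - 3) := by simp
  have e3 : (seg.toList.drop 6).length = seg.toList.length - 6 := by simp
  rw [pv_fold_const (seg.toList.drop 6) _ 3 _ (by
    intro j hj1 hj2
    simp only [e1, e2] at hj1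
    simp only [e3] at hj2
    split_ifs <;> omega)]
  rw [pv_fold_const ((seg.toList.drop 3).take 3) _ 2 _ (by
    intro j hj1 hj2
    simp only [e1] at hj1
    simp only [e1, e2] at hj2
    split_ifs <;> omega)]
  rw [pv_fold_const (seg.toList.take 3) _ 1 _ (by
    intro j hj1 hj2
    simp only [e1] at hj2
    split_ifs <;> omega)]

-- with an empty lookup list A's outer body never changes the accumulator
theorem pv_foldl_nilsel (l : List Char) (a : Int) (s : PySem.Set Int) :
    (PySem.List.enumerate l a).foldl (fun s p =>
        if p.2 = '1' then
          match PySem.List.pyGet? ([] : List String) p.1 with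
          | none => s
          | some seg =>
              (PySem.List.enumerate seg.toList 0).foldl (fun s q =>
                if q.2 = '1' then
                  if q.1 < 3 then PySem.Set.add s 1 else if q.1 < 6 then PySem.Set.add s 2 else PySem.Set.add s 3
                else s) s
        else s) s = s := by
  induction l generalizing a s with
  | nil => simp [PySem.List.enumerate_nil]
  | cons x xs ih =>
      rw [PySem.List.enumerate_cons, List.foldl_cons]
      have hg : PySem.List.pyGet? ([] : List String) a = none := by
        simp [PySem.List.pyGet?, PySem.List.pyIdx?]
      rw [show (if x = '1' then
          match PySem.List.pyGet? ([] : List String) a with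
          | none => s
          | some seg =>
              (PySem.List.enumerate seg.toList 0).foldl (fun s q =>
                if q.2 = '1' then
                  if q.1 < 3 then PySem.Set.add s 1 else if q.1 < 6 then PySem.Set.add s 2 else PySem.Set.add s 3
                else s) s
        else s) = s from by rw [hg]; split <;> rfl]
      exact ih (a + 1) s

-- shifting the enumerate start by one peels one element off the lookup list
theorem pv_shift (xs : List Char) (y : String) (sel : List String) (a : Int) (ha : 0 ≤ a)
    (s : PySem.Set Int) :
    (PySem.List.enumerate xs (a + 1)).foldl (fun s p =>
        if p.2 = '1' then
          match PySem.List.pyGet? (y :: sel) p.1 with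
          | none => s
          | some seg =>
              (PySem.List.enumerate seg.toList 0).foldl (fun s q =>
                if q.2 = '1' then
                  if q.1 < 3 then PySem.Set.add s 1 else if q.1 < 6 then PySem.Set.add s 2 else PySem.Set.add s 3
                else s) s
        else s) s
    = (PySem.List.enumerate xs a).foldl (fun s p =>
        if p.2 = '1' then
          match PySem.List.pyGet? sel p.1 with
          | none => s
          | some seg =>
              (PySem.List.enumerate seg.toList 0).foldl (fun s q =>
                if q.2 = '1' then
                  if q.1 < 3 then PySem.Set.add s 1 else if q.1 < 6 then PySem.Set.add s 2 else PySem.Set.add s 3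
                else s) s
        else s) s := by
  induction xs generalizing a s with
  | nil => simp [PySem.List.enumerate_nil]
  | cons x xs ih =>
      rw [PySem.List.enumerate_cons, PySem.List.enumerate_cons, List.foldl_cons, List.foldl_cons]
      have hget : PySem.List.pyGet? (y :: sel) (a + 1) = PySem.List.pyGet? sel a := by
        obtain ⟨n, rfl⟩ := Int.eq_ofNat_of_zero_le ha
        have h1 : ((n : Int) + 1) = ((n + 1 : Nat) : Int) := by push_cast; ring
        rw [h1, PySem.List.pyGet?_natCast, PySem.List.pyGet?_natCast]
        simp
      rw [hget]
      exact ih (a + 1) (by omega) _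

-- A's outer loop over the enumerated bits equals a fold of pvZ over the zip (under Pre_)
set_option maxHeartbeats 1000000 in
theorem pv_outer_zip (l : List Char) (sel : List String)
    (hpre : '1' ∉ l.drop sel.length) (s : PySem.Set Int) :
    (PySem.List.enumerate l 0).foldl (fun s p =>
        if p.2 = '1' then
          match PySem.List.pyGet? sel p.1 with
          | none => s
          | some seg =>
              (PySem.List.enumerate seg.toList 0).foldl (fun s q =>
                if q.2 = '1' then
                  if q.1 < 3 then PySem.Set.add s 1 else if q.1 < 6 then PySem.Set.add s 2 else PySem.Set.add s 3
                else s) s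
        else s) s
    = (l.zip sel).foldl pvZ s := by
  induction l generalizing sel s with
  | nil => simp [PySem.List.enumerate_nil]
  | cons x xs ih =>
      cases sel with
      | nil =>
          simp only [List.zip_nil_right, List.foldl_nil]
          exact pv_foldl_nilsel (x :: xs) 0 s
      | cons y ys =>
          rw [PySem.List.enumerate_cons, List.foldl_cons, List.zip_cons_cons, List.foldl_cons]
          have h0 : PySem.List.pyGet? (y :: ys) (0 : Int) = some y := by simp
          have hpre' : '1' ∉ xs.drop ys.length := by
            intro h; exact hpre (by simpa using h)
          rw [pv_shift xs y ys 0 le_rfl, ih ys hpre']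
          congr 1
          simp only [pvZ, h0]
          by_cases hx : x = '1'
          · simp only [hx, if_true]
            exact pv_inner_eq y s
          · simp [hx]

-- membership in one pvInner step
set_option maxHeartbeats 1000000 in
theorem pv_mem_inner (seg : String) (s : PySem.Set Int) (x : Int) :
    x ∈ pvInner seg s ↔ x ∈ s ∨
      ((x = 1 ∧ PySem.Str.isIn "1" (PySem.Str.slice seg (some 0) (some 3)) = true) ∨
       (x = 2 ∧ PySem.Str.isIn "1" (PySem.Str.slice seg (some 3) (some 6)) = true) ∨
       (x = 3 ∧ PySem.Str.isIn "1" (PySem.Str.slice seg (some 6) none) = true)) := by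
  unfold pvInner
  split_ifs with h1 h2 h3 h4 h5 h6 h7 <;>
    simp_all [PySem.Set.mem_add] <;> tauto

-- membership in the zip-fold of pvZ
set_option maxHeartbeats 1000000 in
theorem pv_mem_zipfold (pz : List (Char × String)) (s : PySem.Set Int) (x : Int) :
    x ∈ pz.foldl pvZ s ↔ x ∈ s ∨ ∃ p ∈ pz, p.1 = '1' ∧
      ((x = 1 ∧ PySem.Str.isIn "1" (PySem.Str.slice p.2 (some 0) (some 3)) = true) ∨
       (x = 2 ∧ PySem.Str.isIn "1" (PySem.Str.slice p.2 (some 3) (some 6)) = true) ∨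
       (x = 3 ∧ PySem.Str.isIn "1" (PySem.Str.slice p.2 (some 6) none) = true)) := by
  induction pz generalizing s with
  | nil => simp
  | cons p pz ih =>
      rw [List.foldl_cons, ih]
      have hmem : x ∈ pvZ s p ↔ x ∈ s ∨ (p.1 = '1' ∧
          ((x = 1 ∧ PySem.Str.isIn "1" (PySem.Str.slice p.2 (some 0) (some 3)) = true) ∨
           (x = 2 ∧ PySem.Str.isIn "1" (PySem.Str.slice p.2 (some 3) (some 6)) = true) ∨
           (x = 3 ∧ PySem.Str.isIn "1" (PySem.Str.slice p.2 (some 6) none) = true))) := by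
        unfold pvZ
        split_ifs with h1
        · rw [pv_mem_inner]
          constructor
          · rintro (h | h)
            · exact Or.inl h
            · exact Or.inr ⟨h1, h⟩
          · rintro (h | ⟨_, h⟩)
            · exact Or.inl h
            · exact Or.inr h
        · simp [h1]
      rw [hmem]
      simp only [List.mem_cons]
      constructor
      · rintro ((h | h) | ⟨q, hq, hh⟩)
        · exact Or.inl h
        · exact Or.inr ⟨p, Or.inl rfl, h⟩
        · exact Or.inr ⟨q, Or.inr hq, hh⟩
      · rintro (h | ⟨q, (rfl | hq), hh⟩)
        · exact Or.inl (Or.inl h)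
        · exact Or.inl (Or.inr hh)
        · exact Or.inr ⟨q, hq, hh⟩

theorem pv_nodup_zipfold (pz : List (Char × String)) (s : PySem.Set Int) (hs : s.Nodup) :
    (pz.foldl pvZ s).Nodup := by
  induction pz generalizing s with
  | nil => exact hs
  | cons p pz ih =>
      apply ih
      unfold pvZ pvInner
      split_ifs <;>
        first
          | exact hs
          | exact PySem.Set.nodup_add _ _ hs
          | exact PySem.Set.nodup_add _ _ (PySem.Set.nodup_add _ _ hs)
          | exact PySem.Set.nodup_add _ _ (PySem.Set.nodup_add _ _ (PySem.Set.nodup_add _ _ hs))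

theorem pv_mem_ite (b : Bool) (c x : Int) :
    x ∈ (if b then [c] else ([] : List Int)) ↔ b = true ∧ x = c := by
  cases b <;> simp

theorem pv_ys_nodup (b1 b2 b3 : Bool) :
    ((if b1 then [(1 : Int)] else []) ++ (if b2 then [2] else []) ++ (if b3 then [3] else [])).Nodup := by
  cases b1 <;> cases b2 <;> cases b3 <;> decide

theorem pv_ys_pairwise (b1 b2 b3 : Bool) :
    List.Pairwise (fun a b : Int => a < b)
      ((if b1 then [(1 : Int)] else []) ++ (if b2 then [2] else []) ++ (if b3 then [3] else [])) := by
  cases b1 <;> cases b2 <;> cases b3 <;> decide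

theorem pv_filter_foldl (c : Int × Int × Option Int → Bool) :
    (([((1 : Int), ((0 : Int), some (3 : Int))), (2, (3, some 6)), (3, (6, none))]).filter c).foldl
        (fun options r => options ++ [r.1]) []
    = (if c (1, (0, some 3)) then [(1 : Int)] else []) ++ (if c (2, (3, some 6)) then [2] else [])
      ++ (if c (3, (6, none)) then [3] else []) := by
  cases h1 : c (1, (0, some 3)) <;> cases h2 : c (2, (3, some 6)) <;> cases h3 : c (3, (6, none)) <;>
    simp [List.filter_nil, h1, h2, h3]

-- sorting the set built by the zip-fold gives exactly B's range-filtered output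
set_option maxHeartbeats 1000000 in
theorem pv_sorted_eq (pz : List (Char × String)) :
    PySem.List.sorted (pz.foldl pvZ (PySem.Set.empty : PySem.Set Int)) (fun x => x) false
    = ([((1 : Int), ((0 : Int), some (3 : Int))), (2, (3, some 6)), (3, (6, none))].filter
        (fun r => ((pz.filter (fun p => p.1 = '1')).map (fun p => p.2)).any
          (fun seg => PySem.Str.isIn "1" (PySem.Str.slice seg (some r.2.1) r.2.2)))).foldl
        (fun options r => options ++ [r.1]) [] := by
  have hq : ∀ (c : String → Bool),
      (((pz.filter (fun p => p.1 = '1')).map (fun p => p.2)).any c = true)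
      ↔ ∃ p ∈ pz, p.1 = '1' ∧ c p.2 = true := by
    intro c
    simp only [List.any_eq_true, List.mem_map, List.mem_filter, decide_eq_true_eq]
    constructor
    · rintro ⟨seg, ⟨p, ⟨hp, hp1⟩, rfl⟩, hc⟩; exact ⟨p, hp, hp1, hc⟩
    · rintro ⟨p, hp, hp1, hc⟩; exact ⟨p.2, ⟨p, ⟨hp, hp1⟩, rfl⟩, hc⟩
  have hmem : ∀ x : Int,
      x ∈ ((if ((pz.filter (fun p => p.1 = '1')).map (fun p => p.2)).any
              (fun seg => PySem.Str.isIn "1" (PySem.Str.slice seg (some 0) (some 3))) then [(1 : Int)] else [])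
          ++ (if ((pz.filter (fun p => p.1 = '1')).map (fun p => p.2)).any
              (fun seg => PySem.Str.isIn "1" (PySem.Str.slice seg (some 3) (some 6))) then [2] else [])
          ++ (if ((pz.filter (fun p => p.1 = '1')).map (fun p => p.2)).any
              (fun seg => PySem.Str.isIn "1" (PySem.Str.slice seg (some 6) none)) then [3] else []))
      ↔ x ∈ pz.foldl pvZ (PySem.Set.empty : PySem.Set Int) := by
    intro x
    rw [pv_mem_zipfold]
    simp only [List.mem_append, pv_mem_ite, PySem.Set.empty, List.not_mem_nil, false_or]
    rw [hq, hq, hq]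
    constructor
    · rintro ((⟨⟨p, hp, hp1, hc⟩, rfl⟩ | ⟨⟨p, hp, hp1, hc⟩, rfl⟩) | ⟨⟨p, hp, hp1, hc⟩, rfl⟩)
      · exact ⟨p, hp, hp1, Or.inl ⟨rfl, hc⟩⟩
      · exact ⟨p, hp, hp1, Or.inr (Or.inl ⟨rfl, hc⟩)⟩
      · exact ⟨p, hp, hp1, Or.inr (Or.inr ⟨rfl, hc⟩)⟩
    · rintro ⟨p, hp, hp1, (⟨rfl, hc⟩ | ⟨rfl, hc⟩ | ⟨rfl, hc⟩)⟩
      · exact Or.inl (Or.inl ⟨⟨p, hp, hp1, hc⟩, rfl⟩)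
      · exact Or.inl (Or.inr ⟨⟨p, hp, hp1, hc⟩, rfl⟩)
      · exact Or.inr ⟨⟨p, hp, hp1, hc⟩, rfl⟩
  have hperm := (List.perm_ext_iff_of_nodup (pv_ys_nodup _ _ _)
    (pv_nodup_zipfold pz _ (by simp [PySem.Set.empty]))).mpr hmem
  rw [PySem.List.sorted_eq_of_perm_of_pairwise_lt _ _ (fun x => x) hperm (pv_ys_pairwise _ _ _)]
  rw [pv_filter_foldl]

-- ===== VERDICT (by name: the statement is the Claim_ definition above) =====
set_option maxHeartbeats 1000000 in
theorem get_plot_options_spec : Claim_equal_get_plot_options := by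
  intro select_acm binary_string _ hpre
  unfold Spec_get_plot_options get_plot_options get_plot_options_alt
  rw [pv_outer_zip binary_string.toList select_acm hpre]
  exact pv_sorted_eq _
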